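-- pv_equiv track=rewrite | github.com/sijie-Z/GeoData-Security-System | testrealend/resource/watermark_utils.py | get_qr_version
-- ===== SOURCE A (Python) =====
-- def get_qr_version(content_length):
--     """Auto-detect QR version based on content length"""
--     version_capacities = [
--         25, 47, 77, 114, 154, 195, 224, 279, 335, 395,
--         468, 535, 619, 667, 758, 854, 938, 1046, 1153, 1249,
--         1358, 1468, 1588, 1704, 1863, 2020, 2121, 2303, 2431, 2563
--     ]
--     for i, capacity in enumerate(version_capacities):
--         if content_length <= capacity:
--             return i + 1
--     return 10
-- ===== SOURCE B (Python) =====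
-- def get_qr_version(content_length):
--     """Auto-detect QR version based on content length (binary search)"""
--     version_capacities = [
--         25, 47, 77, 114, 154, 195, 224, 279, 335, 395,
--         468, 535, 619, 667, 758, 854, 938, 1046, 1153, 1249,
--         1358, 1468, 1588, 1704, 1863, 2020, 2121, 2303, 2431, 2563
--     ]
--     # bisect_left by hand: first index whose capacity is >= content_length
--     lo, hi = 0, len(version_capacities)
--     while lo < hi:
--         mid = (lo + hi) // 2
--         if version_capacities[mid] < content_length:
--             lo = mid + 1
--         else:
--             hi = mid
--     return lo + 1 if lo < 30 else 10
-- ===== Notes on version B (the rewrite author's own statement) =====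
-- stated objective: alternative
-- what changed: Replaced the linear enumerate-scan over the capacity table with a hand-written bisect_left binary search (lo/hi halving) on the same sorted array, keeping the same fallback value for over-long content.
import Mathlib
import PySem

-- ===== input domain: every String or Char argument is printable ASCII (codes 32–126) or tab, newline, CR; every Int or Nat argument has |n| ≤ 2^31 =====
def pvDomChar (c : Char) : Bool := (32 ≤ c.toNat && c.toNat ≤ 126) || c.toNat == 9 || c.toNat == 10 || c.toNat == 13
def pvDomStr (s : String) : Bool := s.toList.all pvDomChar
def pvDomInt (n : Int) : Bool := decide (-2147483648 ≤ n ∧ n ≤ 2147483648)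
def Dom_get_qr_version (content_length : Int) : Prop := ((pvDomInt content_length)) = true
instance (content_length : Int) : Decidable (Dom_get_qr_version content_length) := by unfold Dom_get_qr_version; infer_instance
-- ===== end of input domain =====

-- B replaces A's linear scan of the capacity table with a bisect_left binary search (same values, alternative algorithm).
-- ===== PORT A =====
-- B must not share this list object; each port carries its own literal, as in its Python.
def capsA : List Int := [25, 47, 77, 114, 154, 195, 224, 279, 335, 395,
  468, 535, 619, 667, 758, 854, 938, 1046, 1153, 1249,
  1358, 1468, 1588, 1704, 1863, 2020, 2121, 2303, 2431, 2563]

-- the 'for i, capacity in enumerate(...)' loop with early return; falls through to 10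
def loopA (n : Int) : List Int → Nat → Int
  | [], _ => 10
  | c :: rest, i => if n ≤ c then (i : Int) + 1 else loopA n rest (i + 1)

def get_qr_version (content_length : Int) : Int :=
  loopA content_length capsA 0

-- ===== PORT B =====
def capsB : List Int := [25, 47, 77, 114, 154, 195, 224, 279, 335, 395,
  468, 535, 619, 667, 758, 854, 938, 1046, 1153, 1249,
  1358, 1468, 1588, 1704, 1863, 2020, 2121, 2303, 2431, 2563]

-- hand-written bisect_left: while lo < hi: mid = (lo+hi)//2; … .  The fuel argument
-- (hi-lo strictly decreases, so 30 suffices) only makes the same loop structurally total.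
def bl (x : Int) : Nat → Nat → Nat → Nat
  | 0, lo, _ => lo
  | fuel + 1, lo, hi =>
    if lo < hi then
      let mid := (lo + hi) / 2
      if capsB.getD mid 0 < x then bl x fuel (mid + 1) hi else bl x fuel lo mid
    else lo

def get_qr_version_alt (content_length : Int) : Int :=
  let lo := bl content_length 30 0 30
  if lo < 30 then (lo : Int) + 1 else 10

-- ===== PRECONDITION & SPEC =====
def Spec_get_qr_version (content_length : Int) (out : Int) : Prop := out = get_qr_version_alt content_length
instance (content_length : Int) (out : Int) : Decidable (Spec_get_qr_version content_length out) := by unfold Spec_get_qr_version; infer_instance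

-- ===== CLAIM (what is proved, stated in full; the proofs are below) =====
def Claim_equal_get_qr_version : Prop := ∀ (content_length : Int), Dom_get_qr_version content_length → Spec_get_qr_version content_length (get_qr_version content_length)

-- ===== LEMMAS AND PROOFS =====

-- positionwise bounds on the capacity table
lemma caps_ge : ∀ m : Fin 30, 25 ≤ capsB.getD m.val 0 := by decide

lemma caps_le : ∀ m : Fin 30, capsB.getD m.val 0 ≤ 2563 := by decide

-- n below every capacity: the binary search always goes left and returns lo
lemma bl_low (n : Int) (h : n ≤ 25) :
    ∀ fuel lo hi, hi - lo ≤ fuel → hi ≤ 30 → bl n fuel lo hi = lo := by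
  intro fuel
  induction fuel with
  | zero => intro lo hi h1 h2; simp [bl]
  | succ f ih =>
    intro lo hi h1 h2
    simp only [bl]
    split_ifs with hx hc
    · exact absurd hc (by have := caps_ge ⟨(lo + hi) / 2, by omega⟩; simp only at this; omega)
    · exact ih lo ((lo + hi) / 2) (by omega) (by omega)
    · rfl

-- n above every capacity: the binary search always goes right and returns hi
lemma bl_high (n : Int) (h : 2563 < n) :
    ∀ fuel lo hi, hi - lo ≤ fuel → lo ≤ hi → hi ≤ 30 → bl n fuel lo hi = hi := by
  intro fuel
  induction fuel with
  | zero => intro lo hi h1 h2 h3; simp [bl]; omega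
  | succ f ih =>
    intro lo hi h1 h2 h3
    simp only [bl]
    split_ifs with hx hc
    · exact ih ((lo + hi) / 2 + 1) hi (by omega) (by omega) h3
    · exact absurd (by have := caps_le ⟨(lo + hi) / 2, by omega⟩; simp only at this; omega : capsB.getD ((lo + hi) / 2) 0 < n) hc
    · omega

-- the linear scan returns the fallback 10 when no capacity admits the content
lemma loopA_none (n : Int) : ∀ l i, (∀ c ∈ l, c < n) → loopA n l i = 10 := by
  intro l
  induction l with
  | nil => intro i _; rfl
  | cons c rest ih =>
    intro i hall
    simp only [loopA]
    rw [if_neg (by have := hall c (by simp); omega)]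
    exact ih (i + 1) (fun d hd => hall d (by simp [hd]))

lemma capsA_le : ∀ c ∈ capsA, c ≤ 2563 := by decide

-- the finite middle range 0..2799 (covers 0..2563), checked pointwise by the kernel in 7 blocks of 400
set_option maxRecDepth 10000 in
lemma mid_range : ∀ k : Fin 7, ∀ j : Fin 400,
    get_qr_version ((400 * (k : Nat) + (j : Nat) : Nat) : Int) =
    get_qr_version_alt ((400 * (k : Nat) + (j : Nat) : Nat) : Int) := by decide

-- ===== VERDICT (by name: the statement is the Claim_ definition above) =====
theorem get_qr_version_spec : Claim_equal_get_qr_version := by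
  intro n _
  unfold Spec_get_qr_version
  by_cases hlo : n < 0
  · unfold get_qr_version get_qr_version_alt
    rw [bl_low n (by omega) 30 0 30 (by omega) (by omega)]
    show loopA n capsA 0 = if (0 : Nat) < 30 then ((0 : Nat) : Int) + 1 else 10
    rw [if_pos (by omega)]
    show (if n ≤ 25 then ((0 : Nat) : Int) + 1 else loopA n _ 1) = _
    rw [if_pos (by omega)]
  · by_cases hhi : 2563 < n
    · unfold get_qr_version get_qr_version_alt
      rw [bl_high n hhi 30 0 30 (by omega) (by omega) (by omega)]
      rw [loopA_none n capsA 0 (fun c hc => by have := capsA_le c hc; omega)]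
      rfl
    · have hk : n = ((n.toNat : Int)) := by omega
      have hq : n.toNat / 400 < 7 := by omega
      have hr : n.toNat % 400 < 400 := by omega
      have h := mid_range ⟨n.toNat / 400, hq⟩ ⟨n.toNat % 400, hr⟩
      have e : 400 * (n.toNat / 400) + n.toNat % 400 = n.toNat := by omega
      simp only at h
      rw [e] at h
      rw [hk]
      exact h
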